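-- pv_equiv track=rewrite | github.com/fpjr1975/SierraAutomation | ocr_docs.py | format_document_response
-- ===== SOURCE A (Python) =====
-- def format_document_response(data: dict) -> str:
--     """Formata os dados extraídos pra exibição no Telegram."""
--     doc_type = data.get("tipo", "Documento").upper()
--
--     if "CNH" in doc_type:
--         return (
--             f"🪪 *CNH Identificada*\n\n"
--             f"👤 *Nome:* `{data.get('nome', 'N/D')}`\n"
--             f"📋 *CPF:* `{data.get('cpf', 'N/D')}`\n"
--             f"🎂 *Nascimento:* `{data.get('data_nascimento', 'N/D')}`\n"
--             f"🆔 *RG:* `{data.get('rg', 'N/D')}`\n"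
--             f"🚗 *Categoria:* `{data.get('categoria', 'N/D')}`\n"
--             f"📅 *Validade:* `{data.get('validade', 'N/D')}`\n"
--             f"📝 *Registro:* `{data.get('numero_registro', 'N/D')}`\n"
--             f"🗓️ *1ª Habilitação:* `{data.get('primeiro_habilitacao', 'N/D')}`"
--         )
--
--     elif "CRVL" in doc_type or "CRV" in doc_type:
--         return (
--             f"📄 *CRVL Identificado*\n\n"
--             f"👤 *Proprietário:* `{data.get('proprietario', 'N/D')}`\n"
--             f"📋 *CPF/CNPJ:* `{data.get('cpf_cnpj', 'N/D')}`\n"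
--             f"🔢 *Placa:* `{data.get('placa', 'N/D')}`\n"
--             f"📝 *Renavam:* `{data.get('renavam', 'N/D')}`\n"
--             f"🔑 *Chassi:* `{data.get('chassi', 'N/D')}`\n"
--             f"🚗 *Veículo:* `{data.get('marca_modelo', 'N/D')}`\n"
--             f"📅 *Fab/Mod:* `{data.get('ano_fabricacao', 'N/D')}/{data.get('ano_modelo', 'N/D')}`\n"
--             f"🎨 *Cor:* `{data.get('cor', 'N/D')}`\n"
--             f"⛽ *Combustível:* `{data.get('combustivel', 'N/D')}`\n"
--             f"📍 *Município:* `{data.get('municipio', 'N/D')}`"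
--         )
--
--     else:
--         lines = [f"📄 *Documento* ({data.get('tipo', '?')})\n"]
--         for key, val in data.items():
--             if key != "tipo" and val and val != "N/D":
--                 lines.append(f"• *{key}:* `{val}`")
--         return "\n".join(lines)
-- ===== SOURCE B (Python) =====
-- # Table-driven rewrite: a spec lookup chooses (header, field table); one generic
-- # builder renders header + per-field lines; unknown types fall back to a generic dump.
--
-- _CNH_FIELDS = [
--     ("👤", "Nome", "nome"),
--     ("📋", "CPF", "cpf"),
--     ("🎂", "Nascimento", "data_nascimento"),
--     ("🆔", "RG", "rg"),
--     ("🚗", "Categoria", "categoria"),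
--     ("📅", "Validade", "validade"),
--     ("📝", "Registro", "numero_registro"),
--     ("🗓️", "1ª Habilitação", "primeiro_habilitacao"),
-- ]
--
-- _CRVL_FIELDS = [
--     ("👤", "Proprietário", "proprietario"),
--     ("📋", "CPF/CNPJ", "cpf_cnpj"),
--     ("🔢", "Placa", "placa"),
--     ("📝", "Renavam", "renavam"),
--     ("🔑", "Chassi", "chassi"),
--     ("🚗", "Veículo", "marca_modelo"),
--     ("📅", "Fab/Mod", None),  # None key = combined ano_fabricacao/ano_modelo field
--     ("🎨", "Cor", "cor"),
--     ("⛽", "Combustível", "combustivel"),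
--     ("📍", "Município", "municipio"),
-- ]
--
--
-- def _spec_for(doc_type):
--     if "CNH" in doc_type:
--         return ("🪪 *CNH Identificada*\n", _CNH_FIELDS)
--     if "CRVL" in doc_type or "CRV" in doc_type:
--         return ("📄 *CRVL Identificado*\n", _CRVL_FIELDS)
--     return None
--
--
-- def format_document_response(data: dict) -> str:
--     doc_type = data.get("tipo", "Documento").upper()
--     spec = _spec_for(doc_type)
--
--     if spec is None:
--         header = f"📄 *Documento* ({data.get('tipo', '?')})\n"
--         body = [f"• *{k}:* `{v}`" for k, v in data.items()
--                 if k != "tipo" and v and v != "N/D"]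
--         return "\n".join([header] + body)
--
--     header, fields = spec
--
--     def value(k):
--         if k is None:
--             return f"{data.get('ano_fabricacao', 'N/D')}/{data.get('ano_modelo', 'N/D')}"
--         return data.get(k, "N/D")
--
--     return "\n".join([header] + [f"{e} *{l}:* `{value(k)}`" for e, l, k in fields])
-- ===== Notes on version B (the rewrite author's own statement) =====
-- stated objective: simpler
-- what changed: Replaces the two hardcoded multi-line f-string branches with a table-driven builder: each branch joins a header and lines generated from an ordered (emoji, label, key) field-spec list, with the combined Fab/Mod field marked specially; the else branch becomes a comprehension over filtered items.
import Mathlib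
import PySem

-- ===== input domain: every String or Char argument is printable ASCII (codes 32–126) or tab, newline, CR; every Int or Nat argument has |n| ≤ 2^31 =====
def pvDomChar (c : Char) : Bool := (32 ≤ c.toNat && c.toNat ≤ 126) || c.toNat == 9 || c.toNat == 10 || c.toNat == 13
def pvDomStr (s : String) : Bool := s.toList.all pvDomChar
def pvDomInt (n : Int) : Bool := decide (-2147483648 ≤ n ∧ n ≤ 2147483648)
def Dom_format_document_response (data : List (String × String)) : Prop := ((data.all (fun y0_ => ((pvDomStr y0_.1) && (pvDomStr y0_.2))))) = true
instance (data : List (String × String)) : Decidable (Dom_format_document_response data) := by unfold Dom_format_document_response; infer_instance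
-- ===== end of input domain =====

-- B is a table-driven rewrite of the same formatter: each branch joins lines built from a field-spec list (objective: simpler).

-- shared primitive: data.get(k, dflt) on the assoc-list dict (first match), exact
def pvGetD (data : List (String × String)) (k dflt : String) : String :=
  match data.find? (fun p => p.1 == k) with
  | some p => p.2
  | none => dflt

-- ===== PORT A =====
def format_document_response (data : List (String × String)) : String :=
  let doc_type := PySem.Str.upper (pvGetD data "tipo" "Documento")
  if PySem.Str.isIn "CNH" doc_type then
    "🪪 *CNH Identificada*\n\n👤 *Nome:* `" ++ pvGetD data "nome" "N/D" ++
    "`\n📋 *CPF:* `" ++ pvGetD data "cpf" "N/D" ++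
    "`\n🎂 *Nascimento:* `" ++ pvGetD data "data_nascimento" "N/D" ++
    "`\n🆔 *RG:* `" ++ pvGetD data "rg" "N/D" ++
    "`\n🚗 *Categoria:* `" ++ pvGetD data "categoria" "N/D" ++
    "`\n📅 *Validade:* `" ++ pvGetD data "validade" "N/D" ++
    "`\n📝 *Registro:* `" ++ pvGetD data "numero_registro" "N/D" ++
    "`\n🗓️ *1ª Habilitação:* `" ++ pvGetD data "primeiro_habilitacao" "N/D" ++ "`"
  else if PySem.Str.isIn "CRVL" doc_type || PySem.Str.isIn "CRV" doc_type then
    "📄 *CRVL Identificado*\n\n👤 *Proprietário:* `" ++ pvGetD data "proprietario" "N/D" ++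
    "`\n📋 *CPF/CNPJ:* `" ++ pvGetD data "cpf_cnpj" "N/D" ++
    "`\n🔢 *Placa:* `" ++ pvGetD data "placa" "N/D" ++
    "`\n📝 *Renavam:* `" ++ pvGetD data "renavam" "N/D" ++
    "`\n🔑 *Chassi:* `" ++ pvGetD data "chassi" "N/D" ++
    "`\n🚗 *Veículo:* `" ++ pvGetD data "marca_modelo" "N/D" ++
    "`\n📅 *Fab/Mod:* `" ++ pvGetD data "ano_fabricacao" "N/D" ++ "/" ++ pvGetD data "ano_modelo" "N/D" ++
    "`\n🎨 *Cor:* `" ++ pvGetD data "cor" "N/D" ++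
    "`\n⛽ *Combustível:* `" ++ pvGetD data "combustivel" "N/D" ++
    "`\n📍 *Município:* `" ++ pvGetD data "municipio" "N/D" ++ "`"
  else
    let lines := ["📄 *Documento* (" ++ pvGetD data "tipo" "?" ++ ")\n"]
    let lines := data.foldl (fun acc kv =>
      if kv.1 ≠ "tipo" ∧ kv.2 ≠ "" ∧ kv.2 ≠ "N/D" then
        acc ++ ["• *" ++ kv.1 ++ ":* `" ++ kv.2 ++ "`"]
      else acc) lines
    PySem.Str.join "\n" lines

-- ===== PORT B =====
-- B-side helpers: field-spec tables ('none' key = the combined Fab/Mod field), spec lookup, line builder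
def pvLine (emoji label value : String) : String :=
  emoji ++ " *" ++ label ++ ":* `" ++ value ++ "`"

def pvCnhFields : List (String × String × Option String) :=
  [("👤", "Nome", some "nome"),
   ("📋", "CPF", some "cpf"),
   ("🎂", "Nascimento", some "data_nascimento"),
   ("🆔", "RG", some "rg"),
   ("🚗", "Categoria", some "categoria"),
   ("📅", "Validade", some "validade"),
   ("📝", "Registro", some "numero_registro"),
   ("🗓️", "1ª Habilitação", some "primeiro_habilitacao")]

def pvCrvlFields : List (String × String × Option String) :=
  [("👤", "Proprietário", some "proprietario"),
   ("📋", "CPF/CNPJ", some "cpf_cnpj"),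
   ("🔢", "Placa", some "placa"),
   ("📝", "Renavam", some "renavam"),
   ("🔑", "Chassi", some "chassi"),
   ("🚗", "Veículo", some "marca_modelo"),
   ("📅", "Fab/Mod", none),
   ("🎨", "Cor", some "cor"),
   ("⛽", "Combustível", some "combustivel"),
   ("📍", "Município", some "municipio")]

def pvSpecFor (doc_type : String) : Option (String × List (String × String × Option String)) :=
  if PySem.Str.isIn "CNH" doc_type then some ("🪪 *CNH Identificada*\n", pvCnhFields)
  else if PySem.Str.isIn "CRVL" doc_type || PySem.Str.isIn "CRV" doc_type then
    some ("📄 *CRVL Identificado*\n", pvCrvlFields)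
  else none

def format_document_response_alt (data : List (String × String)) : String :=
  let doc_type := PySem.Str.upper (pvGetD data "tipo" "Documento")
  match pvSpecFor doc_type with
  | none =>
    let header := "📄 *Documento* (" ++ pvGetD data "tipo" "?" ++ ")\n"
    let body := (data.filter (fun kv => kv.1 ≠ "tipo" ∧ kv.2 ≠ "" ∧ kv.2 ≠ "N/D")).map
      (fun kv => "• *" ++ kv.1 ++ ":* `" ++ kv.2 ++ "`")
    PySem.Str.join "\n" (header :: body)
  | some (header, fields) =>
    let value := fun (k : Option String) =>
      match k with
      | none => pvGetD data "ano_fabricacao" "N/D" ++ "/" ++ pvGetD data "ano_modelo" "N/D"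
      | some k => pvGetD data k "N/D"
    PySem.Str.join "\n" (header :: fields.map (fun f => pvLine f.1 f.2.1 (value f.2.2)))

-- ===== PRECONDITION & SPEC =====
def Spec_format_document_response (data : List (String × String)) (out : String) : Prop := out = format_document_response_alt data
instance (data : List (String × String)) (out : String) : Decidable (Spec_format_document_response data out) := by unfold Spec_format_document_response; infer_instance

-- ===== CLAIM (what is proved, stated in full; the proofs are below) =====
def Claim_equal_format_document_response : Prop := ∀ (data : List (String × String)), Dom_format_document_response data → Spec_format_document_response data (format_document_response data)

-- ===== LEMMAS AND PROOFS =====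

-- ===== VERDICT (by name: the statement is the Claim_ definition above) =====
set_option maxRecDepth 16384 in
theorem format_document_response_spec : Claim_equal_format_document_response := by
  intro data _
  unfold Spec_format_document_response format_document_response format_document_response_alt pvSpecFor
  dsimp only
  split_ifs with h1 h2
  · rw [← String.toList_inj]
    simp [pvCnhFields, pvLine, PySem.Str.join, PySem.Chars.join, List.intercalate]
  · rw [← String.toList_inj]
    simp [pvCrvlFields, pvLine, PySem.Str.join, PySem.Chars.join, List.intercalate]
  · rw [← String.toList_inj]
    rw [PySem.List.foldl_append_ite]
    simp [PySem.Str.join, PySem.Chars.join, List.intercalate]
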